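-- pv_equiv track=rewrite | github.com/nolanwinsman/Other-Code | movie_renamer.py | text_after_year_folder
-- ===== SOURCE A (Python) =====
-- def text_after_year_folder(folder):
--     """If the string file has four numbers in a row representing a year,
--        adds parenthesis around the four numbers.
--        Batman 1989xRAREx1080   ---->   Batman
--     """
--     pointer = 0
--     year = 0
--     for c in folder:
--         pointer += 1
--         if c.isdigit():
--             year += 1
--         else:
--             year = 0
--         if year == 4:
--             pointer = pointer - 4
--             return folder[:pointer]
--     return folder
-- ===== SOURCE B (Python) =====
-- def text_after_year_folder(folder):
--     for i in range(len(folder) - 3):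
--         if folder[i:i+4].isdigit():
--             return folder[:i]
--     return folder
-- ===== Notes on version B (the rewrite author's own statement) =====
-- stated objective: simpler
-- what changed: Replaced the running consecutive-digit counter with reset logic by a single scan that tests each fixed 4-character window folder[i:i+4].isdigit() and returns folder[:i] at the first all-digit window.
import Mathlib
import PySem

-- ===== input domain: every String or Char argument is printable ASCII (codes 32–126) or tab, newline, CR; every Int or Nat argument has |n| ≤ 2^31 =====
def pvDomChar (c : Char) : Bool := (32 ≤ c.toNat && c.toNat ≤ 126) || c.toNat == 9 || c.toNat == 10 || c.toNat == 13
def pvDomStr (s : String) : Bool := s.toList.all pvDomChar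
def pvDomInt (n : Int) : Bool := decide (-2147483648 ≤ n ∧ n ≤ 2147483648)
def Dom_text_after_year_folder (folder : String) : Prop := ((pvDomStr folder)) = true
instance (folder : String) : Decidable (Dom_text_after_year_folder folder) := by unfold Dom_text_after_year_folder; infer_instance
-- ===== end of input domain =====

-- B replaces A's running consecutive-digit counter by a first all-digit 4-char window scan (objective: simpler).

-- ===== PORT A =====
-- A's loop: pointer/year accumulator state, early return on a run of four digits.
def pvGoA (folder : List Char) : List Char → Nat → Nat → List Char
  | [], _, _ => folder
  | c :: rest, pointer, year =>
    let pointer' := pointer + 1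
    let year' := if PySem.Chars.isdigit c then year + 1 else 0
    if year' = 4 then folder.take (pointer' - 4)
    else pvGoA folder rest pointer' year'

def text_after_year_folder (folder : String) : String :=
  String.ofList (pvGoA folder.toList folder.toList 0 0)

-- ===== PORT B =====
-- folder[i:i+4].isdigit()
def pvWin (cs : List Char) (i : Int) : Bool :=
  PySem.Chars.strIsdigit (PySem.List.slice cs (some i) (some (i + 4)))

-- B's loop: for i in range(len(folder) - 3): if window all-digit, return folder[:i]
def pvGoB (cs : List Char) : List Int → List Char
  | [] => cs
  | i :: rest =>
    if pvWin cs i then PySem.List.slice cs none (some i)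
    else pvGoB cs rest

def text_after_year_folder_alt (folder : String) : String :=
  String.ofList (pvGoB folder.toList (PySem.List.pyRange 0 ((folder.toList.length : Int) - 3) 1))

-- ===== PRECONDITION & SPEC =====
def Spec_text_after_year_folder (folder : String) (out : String) : Prop := out = text_after_year_folder_alt folder
instance (folder : String) (out : String) : Decidable (Spec_text_after_year_folder folder out) := by unfold Spec_text_after_year_folder; infer_instance

-- ===== CLAIM (what is proved, stated in full; the proofs are below) =====
def Claim_equal_text_after_year_folder : Prop := ∀ (folder : String), Dom_text_after_year_folder folder → Spec_text_after_year_folder folder (text_after_year_folder folder)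

-- ===== LEMMAS AND PROOFS =====

def pvAt (cs : List Char) (k : Nat) : Char := cs.getD k ' '

def pvWinN (cs : List Char) (s : Nat) : Bool :=
  ((cs.drop s).take 4).all PySem.Chars.isdigit

-- first index i ≥ s with i + 4 ≤ |cs| whose 4-char window is all digits
def pvFirst (cs : List Char) (s : Nat) : Option Nat :=
  if s + 4 ≤ cs.length then
    (if pvWinN cs s then some s else pvFirst cs (s + 1))
  else none
termination_by cs.length - s
decreasing_by omega

lemma pvWinN_iff (cs : List Char) (s : Nat) :
    pvWinN cs s = true ↔
      ∀ k, s ≤ k → k < min (s + 4) cs.length → PySem.Chars.isdigit (pvAt cs k) = true := by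
  unfold pvWinN
  rw [List.all_eq_true]
  constructor
  · intro h k hk1 hk2
    have hlen : k - s < ((cs.drop s).take 4).length := by
      simp [List.length_take, List.length_drop]; omega
    have hmem := List.getElem_mem hlen
    have hval : ((cs.drop s).take 4)[k - s] = cs[k]'(by omega) := by
      rw [List.getElem_take, List.getElem_drop]
      congr 1
      omega
    have := h _ hmem
    rw [hval] at this
    unfold pvAt
    rwa [List.getD_eq_getElem cs ' ' (by omega)]
  · intro h x hx
    obtain ⟨j, hj, rfl⟩ := List.mem_iff_getElem.mp hx
    have hj' : j < min 4 (cs.length - s) := by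
      simpa [List.length_take, List.length_drop] using hj
    have hval : ((cs.drop s).take 4)[j] = cs[s + j]'(by omega) := by
      rw [List.getElem_take, List.getElem_drop]
    rw [hval]
    have := h (s + j) (by omega) (by omega)
    unfold pvAt at this
    rwa [List.getD_eq_getElem cs ' ' (by omega)] at this

lemma pvWin_eq (cs : List Char) (s : Nat) (h : s < cs.length) :
    pvWin cs (s : Int) = pvWinN cs s := by
  unfold pvWin pvWinN PySem.Chars.strIsdigit
  have h4 : ((s : Int) + 4) = ((s + 4 : Nat) : Int) := by push_cast; ring
  rw [h4, PySem.List.slice_natCast]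
  have hsub : s + 4 - s = 4 := by omega
  rw [hsub]
  have hne : ((cs.drop s).take 4).isEmpty = false := by
    rw [List.isEmpty_eq_false_iff, ← List.length_pos_iff]
    simp [List.length_take, List.length_drop]; omega
  rw [hne]
  simp

lemma pvFirst_none (cs : List Char) (s : Nat) (h : cs.length ≤ s + 3) :
    pvFirst cs s = none := by
  rw [pvFirst]
  have : ¬ (s + 4 ≤ cs.length) := by omega
  simp [this]

lemma pvFirst_skip (cs : List Char) (p : Nat) (hp : p < cs.length)
    (hd : PySem.Chars.isdigit (pvAt cs p) = false) :
    ∀ d s, s + d = p + 1 → p ≤ s + 3 → pvFirst cs s = pvFirst cs (p + 1) := by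
  intro d
  induction d with
  | zero =>
    intro s h1 _
    have : s = p + 1 := by omega
    rw [this]
  | succ d ih =>
    intro s h1 h2
    have hs : s ≤ p := by omega
    rw [pvFirst]
    by_cases hb : s + 4 ≤ cs.length
    · have hw : pvWinN cs s = false := by
        by_contra hcon
        have htrue : pvWinN cs s = true := by
          cases hval : pvWinN cs s
          · exact absurd hval hcon
          · rfl
        have := (pvWinN_iff cs s).mp htrue p hs (by omega)
        rw [hd] at this
        exact Bool.false_ne_true this
      simp [hb, hw]
      exact ih (s + 1) (by omega) (by omega)
    · simp [hb]
      symm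
      exact pvFirst_none cs (p + 1) (by omega)

lemma pvGoA_eq (folder : List Char) :
    ∀ rest p y, rest = folder.drop p → y ≤ 3 → y ≤ p →
      (∀ k, p - y ≤ k → k < p → PySem.Chars.isdigit (pvAt folder k) = true) →
      pvGoA folder rest p y =
        (match pvFirst folder (p - y) with | none => folder | some i => folder.take i) := by
  intro rest
  induction rest with
  | nil =>
    intro p y hdrop hy3 hyp _
    have hlen : folder.length ≤ p := by
      by_contra hcon
      push_neg at hcon
      have := congrArg List.length hdrop
      simp [List.length_drop] at this
      omega
    rw [pvFirst_none folder (p - y) (by omega)]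
    simp [pvGoA]
  | cons c rest' ih =>
    intro p y hdrop hy3 hyp hrun
    have hp : p < folder.length := by
      by_contra hcon
      push_neg at hcon
      rw [List.drop_eq_nil_of_le hcon] at hdrop
      exact List.cons_ne_nil c rest' hdrop
    have hcons := List.drop_eq_getElem_cons hp
    rw [hcons] at hdrop
    have hc : c = folder[p] := (List.cons_eq_cons.mp hdrop.symm).1.symm
    have hrest : rest' = folder.drop (p + 1) := (List.cons_eq_cons.mp hdrop.symm).2.symm
    have hcat : pvAt folder p = c := by
      unfold pvAt
      rw [List.getD_eq_getElem folder ' ' hp, hc]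
    by_cases hdig : PySem.Chars.isdigit c = true
    · by_cases hy : y = 3
      · -- run of four completes: A returns take (p - 3)
        have hgoA : pvGoA folder (c :: rest') p y = folder.take (p + 1 - 4) := by
          rw [pvGoA]
          simp [hdig, hy]
        rw [hgoA]
        have hp3 : 3 ≤ p := by omega
        have hfirst : pvFirst folder (p - y) = some (p - 3) := by
          rw [hy, pvFirst]
          have hb : p - 3 + 4 ≤ folder.length := by omega
          have hw : pvWinN folder (p - 3) = true := by
            rw [pvWinN_iff]
            intro k hk1 hk2
            rcases Nat.lt_or_ge k p with hkp | hkp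
            · exact hrun k (by omega) hkp
            · have : k = p := by omega
              rw [this, hcat]
              exact hdig
          simp [hb, hw]
        rw [hfirst]
        congr 1
      · -- run grows, same window start p - y
        have hgoA : pvGoA folder (c :: rest') p y = pvGoA folder rest' (p + 1) (y + 1) := by
          rw [pvGoA]
          have : ¬ (y + 1 = 4) := by omega
          simp [hdig, this]
        rw [hgoA]
        have := ih (p + 1) (y + 1) hrest (by omega) (by omega)
          (by
            intro k hk1 hk2
            rcases Nat.lt_or_ge k p with hkp | hkp
            · exact hrun k (by omega) hkp
            · have : k = p := by omega
              rw [this, hcat]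
              exact hdig)
        rw [this]
        have harg : p + 1 - (y + 1) = p - y := by omega
        rw [harg]
    · -- non-digit resets the counter; windows through p are dead
      have hdig' : PySem.Chars.isdigit c = false := by
        cases hval : PySem.Chars.isdigit c
        · rfl
        · exact absurd hval hdig
      have hgoA : pvGoA folder (c :: rest') p y = pvGoA folder rest' (p + 1) 0 := by
        rw [pvGoA]
        simp [hdig']
      rw [hgoA]
      have := ih (p + 1) 0 hrest (by omega) (by omega) (by intro k hk1 hk2; omega)
      rw [this]
      have hskip := pvFirst_skip folder p hp (by rw [hcat]; exact hdig')
        (p + 1 - (p - y)) (p - y) (by omega) (by omega)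
      rw [hskip]
      have harg : p + 1 - 0 = p + 1 := by omega
      rw [harg]

lemma pvGoB_eq (cs : List Char) :
    ∀ c s, s + c = cs.length - 3 →
      pvGoB cs ((List.range' s c).map (fun (k : Nat) => (k : Int))) =
        (match pvFirst cs s with | none => cs | some i => cs.take i) := by
  intro c
  induction c with
  | zero =>
    intro s h
    rw [pvFirst_none cs s (by omega)]
    simp [pvGoB]
  | succ c ih =>
    intro s h
    have hb : s + 4 ≤ cs.length := by omega
    rw [List.range'_succ]
    simp only [List.map_cons]
    rw [pvGoB, pvWin_eq cs s (by omega), pvFirst]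
    by_cases hw : pvWinN cs s = true
    · simp [hw, hb, PySem.List.slice_to_natCast]
    · have hw' : pvWinN cs s = false := by
        cases hval : pvWinN cs s
        · rfl
        · exact absurd hval hw
      rw [hw']
      simp only [Bool.false_eq_true, if_false, if_pos hb]
      exact ih (s + 1) (by omega)

-- ===== VERDICT (by name: the statement is the Claim_ definition above) =====
theorem text_after_year_folder_spec : Claim_equal_text_after_year_folder := by
  intro folder _
  unfold Spec_text_after_year_folder text_after_year_folder text_after_year_folder_alt
  congr 1
  rw [pvGoA_eq folder.toList folder.toList 0 0 (by simp) (by omega) (by omega)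
      (by intro k hk1 hk2; omega)]
  rw [PySem.List.pyRange_one]
  have hm : ((folder.toList.length : Int) - 3 - 0).toNat = folder.toList.length - 3 := by omega
  rw [hm, List.range_eq_range']
  have hfun : (List.range' 0 (folder.toList.length - 3)).map (fun (k : Nat) => (0 : Int) + (k : Int)) =
      (List.range' 0 (folder.toList.length - 3)).map (fun (k : Nat) => (k : Int)) := by
    apply List.map_congr_left; intro k _; ring
  rw [hfun]
  simp only [Nat.sub_self]
  exact (pvGoB_eq folder.toList (folder.toList.length - 3) 0 (by omega)).symm
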